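-- pv_equiv track=rewrite | github.com/Sideloading-Research/telegram_sideload | utils/text_shrinkage_utils/shrink_dialogs.py | remove_metadata_lines
-- ===== SOURCE A (Python) =====
-- def remove_metadata_lines(lines, placeholder, metadata_prefixes):
--     """
--     Remove lines that match metadata prefixes and replace them with placeholders.
--
--     Args:
--         lines: List of text lines
--         placeholder: Placeholder text to use for removed lines
--         metadata_prefixes: List of prefixes that identify metadata lines
--
--     Returns:
--         Tuple of (current_len, lines) where current_len is the updated text length
--     """
--     current_len = len("\n".join(lines))
--
--     # Process all lines once to remove metadata
--     for i in range(len(lines)):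
--         # Skip lines that are already placeholders
--         if lines[i] == placeholder:
--             continue
--
--         # Check if the line is a metadata line
--         if any(lines[i].startswith(prefix) for prefix in metadata_prefixes):
--             # Calculate length difference after replacement
--             old_line_len = len(lines[i])
--             new_line_len = len(placeholder)
--             len_diff = old_line_len - new_line_len
--
--             # Replace the line with placeholder
--             lines[i] = placeholder
--             current_len -= len_diff
--
--     return current_len, lines
-- ===== SOURCE B (Python) =====
-- def remove_metadata_lines(lines, placeholder, metadata_prefixes):
--     """Index the prefixes in a hash set keyed by their lengths and test each
--     line's own leading slices against it (the inner scan over metadata_prefixes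
--     disappears), building the result back-to-front while summing the joined
--     length directly (no join call). Mutates `lines` in place like the original."""
--     prefix_set = set(metadata_prefixes)
--     klens = sorted({len(p) for p in metadata_prefixes})
--     out = []
--     total = 0
--     for line in reversed(lines):
--         if any(line[:k] in prefix_set for k in klens):
--             line = placeholder
--         total += len(line) + (1 if out else 0)
--         out.append(line)
--     out.reverse()
--     lines[:] = out
--     return total, lines
-- ===== Notes on version B (the rewrite author's own statement) =====
-- stated objective: faster
-- what changed: Instead of a forward index loop scanning metadata_prefixes per line while threading a running length-difference accumulator, B puts the prefixes in a hash set indexed by the set of distinct prefix lengths and tests each line by membership of its own leading slices, building the result list back-to-front while summing the joined length directly (no join in the loop, no inner scan over the prefix list).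
import Mathlib
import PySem

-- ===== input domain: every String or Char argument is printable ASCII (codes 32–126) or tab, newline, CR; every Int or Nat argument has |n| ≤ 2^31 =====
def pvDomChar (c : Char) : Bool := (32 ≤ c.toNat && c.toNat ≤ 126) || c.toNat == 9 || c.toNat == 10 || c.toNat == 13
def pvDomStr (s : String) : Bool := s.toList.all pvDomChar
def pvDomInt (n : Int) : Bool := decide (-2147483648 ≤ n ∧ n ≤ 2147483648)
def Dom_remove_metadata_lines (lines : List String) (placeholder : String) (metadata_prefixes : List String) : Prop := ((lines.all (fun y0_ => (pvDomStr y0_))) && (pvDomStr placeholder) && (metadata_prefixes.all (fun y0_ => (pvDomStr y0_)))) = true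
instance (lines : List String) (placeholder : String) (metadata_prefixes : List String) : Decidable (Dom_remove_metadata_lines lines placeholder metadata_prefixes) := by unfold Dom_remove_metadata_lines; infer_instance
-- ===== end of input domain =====

-- B replaces A's forward index loop with its threaded length-difference accumulator by a
-- different strategy: the prefixes go into a hash set indexed by their possible lengths
-- (the inner scan over metadata_prefixes disappears — each line is tested by membership of
-- its own leading slices), and the result is built back-to-front while the joined length
-- is summed directly (no join). Both A and B mutate `lines` in place; the theorems are
-- about the returned value.

-- ===== PORT A =====
-- literal transliteration of A: index loop over range(len(lines)), state = (current_len, lines)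
def remove_metadata_lines (lines : List String) (placeholder : String) (metadata_prefixes : List String) : Int × List String :=
  let current_len : Int := PySem.Str.len (PySem.Str.join "\n" lines)
  (PySem.List.pyRange 0 (lines.length : Int) 1).foldl
    (fun (st : Int × List String) (i : Int) =>
      -- lines[i]; i ranges over range(len(lines)) so the index is always in range
      let line := PySem.List.pyGetD st.2 i ""
      if line == placeholder then st
      else if metadata_prefixes.any (fun pfx => PySem.Str.startswith line pfx) then
        let old_line_len := PySem.Str.len line
        let new_line_len := PySem.Str.len placeholder
        let len_diff := old_line_len - new_line_len
        (st.1 - len_diff, PySem.List.pySetD st.2 i placeholder)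
      else st)
    (current_len, lines)

-- ===== PORT B =====
-- transliteration of Source B: prefix hash set + sorted set of prefix lengths; backward pass
-- appending to `out` and summing the joined length; out.reverse() at the end
def remove_metadata_lines_alt (lines : List String) (placeholder : String) (metadata_prefixes : List String) : Int × List String :=
  let prefix_set : PySem.Set String := PySem.Set.ofList metadata_prefixes
  let klens : List Int :=
    PySem.List.sorted (PySem.Set.ofList (metadata_prefixes.map (fun p => PySem.Str.len p))) (fun x => x) false
  let st := lines.reverse.foldl
    (fun (st : Int × List String) (line : String) =>
      let line := if klens.any (fun k => PySem.Set.contains prefix_set (PySem.Str.slice line none (some k)))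
                  then placeholder else line
      (st.1 + PySem.Str.len line + (if st.2.isEmpty then 0 else 1), st.2 ++ [line]))
    ((0 : Int), ([] : List String))
  (st.1, st.2.reverse)

-- ===== PRECONDITION & SPEC =====
def Spec_remove_metadata_lines (lines : List String) (placeholder : String) (metadata_prefixes : List String) (out : Int × List String) : Prop := out = remove_metadata_lines_alt lines placeholder metadata_prefixes
instance (lines : List String) (placeholder : String) (metadata_prefixes : List String) (out : Int × List String) : Decidable (Spec_remove_metadata_lines lines placeholder metadata_prefixes out) := by unfold Spec_remove_metadata_lines; infer_instance

-- ===== CLAIM (what is proved, stated in full; the proofs are below) =====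
def Claim_equal_remove_metadata_lines : Prop := ∀ (lines : List String) (placeholder : String) (metadata_prefixes : List String), Dom_remove_metadata_lines lines placeholder metadata_prefixes → Spec_remove_metadata_lines lines placeholder metadata_prefixes (remove_metadata_lines lines placeholder metadata_prefixes)

-- ===== LEMMAS AND PROOFS =====

-- length of 'sep.join' on a nonempty tail: peel one element
theorem pv_len_join_cons (sep x : String) (xs : List String) (h : xs ≠ []) :
    PySem.Str.len (PySem.Str.join sep (x :: xs))
      = PySem.Str.len x + PySem.Str.len sep + PySem.Str.len (PySem.Str.join sep xs) := by
  obtain ⟨y, ys, rfl⟩ := List.exists_cons_of_ne_nil h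
  simp [PySem.Str.len_eq, PySem.Str.toList_join, PySem.Chars.join_cons_cons]
  ring

-- replacing one element changes the joined length by exactly the length difference
theorem pv_len_join_replace (sep a b : String) (pre suf : List String) :
    PySem.Str.len (PySem.Str.join sep (pre ++ b :: suf))
      = PySem.Str.len (PySem.Str.join sep (pre ++ a :: suf))
        - (PySem.Str.len a - PySem.Str.len b) := by
  induction pre with
  | nil =>
    cases suf with
    | nil => simp [PySem.Str.len_eq, PySem.Str.toList_join, PySem.Chars.join_singleton]
    | cons y ys =>
      rw [List.nil_append, List.nil_append,
          pv_len_join_cons sep b (y :: ys) (by simp),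
          pv_len_join_cons sep a (y :: ys) (by simp)]
      ring
  | cons p pre ih =>
    rw [List.cons_append, List.cons_append,
        pv_len_join_cons sep p (pre ++ b :: suf) (by simp),
        pv_len_join_cons sep p (pre ++ a :: suf) (by simp), ih]
    ring

-- the per-line rewriting A's loop effectively performs
def pvF (placeholder : String) (metadata_prefixes : List String) (line : String) : String :=
  if metadata_prefixes.any (fun pfx => PySem.Str.startswith line pfx) then placeholder else line

-- A's loop invariant: once the first `pre.length` lines are rewritten, folding A's loop
-- body over the remaining indices produces the pvF rewriting of the suffix, with the
-- accumulator equal to the joined length of the current list throughout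
theorem pv_loop_invariant (placeholder : String) (metadata_prefixes : List String)
    (suf : List String) :
    ∀ (pre : List String),
    (PySem.List.pyRange (pre.length : Int) ((pre.length : Int) + (suf.length : Int)) 1).foldl
      (fun (st : Int × List String) (i : Int) =>
        let line := PySem.List.pyGetD st.2 i ""
        if line == placeholder then st
        else if metadata_prefixes.any (fun pfx => PySem.Str.startswith line pfx) then
          let old_line_len := PySem.Str.len line
          let new_line_len := PySem.Str.len placeholder
          let len_diff := old_line_len - new_line_len
          (st.1 - len_diff, PySem.List.pySetD st.2 i placeholder)
        else st)
      (PySem.Str.len (PySem.Str.join "\n" (pre ++ suf)), pre ++ suf)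
    = (PySem.Str.len (PySem.Str.join "\n" (pre ++ suf.map (pvF placeholder metadata_prefixes))),
        pre ++ suf.map (pvF placeholder metadata_prefixes)) := by
  induction suf with
  | nil =>
    intro pre
    rw [PySem.List.pyRange_one_eq_nil (by simp)]
    simp
  | cons l rest ih =>
    intro pre
    rw [PySem.List.pyRange_one_cons (by push_cast [List.length_cons]; omega)]
    simp only [List.foldl_cons]
    have hget : PySem.List.pyGetD (pre ++ l :: rest) (pre.length : Int) "" = l := by
      rw [PySem.List.pyGetD_natCast]; simp [List.getD]
    rw [hget]
    by_cases hph : l = placeholder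
    · subst hph
      have hf : pvF l metadata_prefixes l = l := by unfold pvF; split <;> rfl
      simp only [beq_self_eq_true, if_true]
      have := ih (pre ++ [l])
      simp only [List.append_assoc, List.singleton_append, List.length_append,
        List.length_cons, List.length_nil] at this ⊢
      rw [List.map_cons, hf]
      push_cast at this ⊢
      rw [show ((pre.length : Int) + ((rest.length : Int) + 1)) = (pre.length : Int) + 1 + (rest.length : Int) by ring]
      exact this
    · have hbeq : (l == placeholder) = false := by simp [hph]
      rw [hbeq]
      simp only [Bool.false_eq_true, if_false]
      by_cases hany : metadata_prefixes.any (fun pfx => PySem.Str.startswith l pfx) = true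
      · rw [if_pos hany]
        have hf : pvF placeholder metadata_prefixes l = placeholder := by unfold pvF; rw [if_pos hany]
        have hset : PySem.List.pySetD (pre ++ l :: rest) (pre.length : Int) placeholder
            = pre ++ placeholder :: rest := by
          rw [PySem.List.pySetD_natCast, List.set_append]
          simp
        have hlen : PySem.Str.len (PySem.Str.join "\n" (pre ++ l :: rest))
            - (PySem.Str.len l - PySem.Str.len placeholder)
            = PySem.Str.len (PySem.Str.join "\n" (pre ++ placeholder :: rest)) :=
          (pv_len_join_replace "\n" l placeholder pre rest).symm
        simp only [hset, hlen]
        have := ih (pre ++ [placeholder])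
        simp only [List.append_assoc, List.singleton_append, List.length_append,
          List.length_cons, List.length_nil] at this ⊢
        rw [List.map_cons, hf]
        push_cast at this ⊢
        rw [show ((pre.length : Int) + ((rest.length : Int) + 1)) = (pre.length : Int) + 1 + (rest.length : Int) by ring]
        exact this
      · rw [if_neg hany]
        have hf : pvF placeholder metadata_prefixes l = l := by unfold pvF; rw [if_neg hany]
        have := ih (pre ++ [l])
        simp only [List.append_assoc, List.singleton_append, List.length_append,
          List.length_cons, List.length_nil] at this ⊢
        rw [List.map_cons, hf]
        push_cast at this ⊢
        rw [show ((pre.length : Int) + ((rest.length : Int) + 1)) = (pre.length : Int) + 1 + (rest.length : Int) by ring]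
        exact this

-- B's slice/hash-set membership test agrees with A's startswith scan
theorem pv_test_eq (metadata_prefixes : List String) (line : String) :
    ((PySem.List.sorted (PySem.Set.ofList (metadata_prefixes.map (fun p => PySem.Str.len p))) (fun x => x) false).any
      (fun k => PySem.Set.contains (PySem.Set.ofList metadata_prefixes) (PySem.Str.slice line none (some k))))
    = metadata_prefixes.any (fun pfx => PySem.Str.startswith line pfx) := by
  rw [Bool.eq_iff_iff]
  simp only [List.any_eq_true, PySem.List.mem_sorted, PySem.Set.mem_ofList,
    PySem.Set.contains_iff, List.mem_map]
  constructor
  · rintro ⟨k, ⟨p, hp, rfl⟩, hc⟩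
    refine ⟨_, hc, ?_⟩
    rw [PySem.Str.startswith_eq, PySem.Chars.startswith_iff]
    rw [PySem.Str.toList_slice]
    have h0 : (0 : Int) ≤ PySem.Str.len p := by rw [PySem.Str.len_eq]; positivity
    rw [show PySem.Chars.slice line.toList none (some (PySem.Str.len p))
          = PySem.List.slice line.toList none (some (PySem.Str.len p)) from rfl,
        PySem.List.slice_to _ h0]
    exact List.take_prefix _ _
  · rintro ⟨p, hp, hs⟩
    refine ⟨PySem.Str.len p, ⟨p, hp, rfl⟩, ?_⟩
    have hpre : p.toList <+: line.toList := by
      rw [PySem.Str.startswith_eq, PySem.Chars.startswith_iff] at hs; exact hs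
    have hsl : PySem.Str.slice line none (some (PySem.Str.len p)) = p := by
      apply String.toList_inj.mp
      rw [PySem.Str.toList_slice,
          show PySem.Chars.slice line.toList none (some (PySem.Str.len p))
            = PySem.List.slice line.toList none (some (PySem.Str.len p)) from rfl,
          PySem.List.slice_to _ (by rw [PySem.Str.len_eq]; positivity)]
      rw [PySem.Str.len_eq]
      simp only [Int.toNat_natCast]
      exact (List.prefix_iff_eq_take.mp hpre).symm
    rw [hsl]
    exact hp

-- B's step function after rewriting the test via pv_test_eq
theorem pv_B_fold_ne_nil (placeholder : String) (metadata_prefixes : List String)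
    (ys : List String) :
    ∀ (t : Int) (acc : List String), acc ≠ [] →
    ys.foldl
      (fun (st : Int × List String) (line : String) =>
        let line := pvF placeholder metadata_prefixes line
        (st.1 + PySem.Str.len line + (if st.2.isEmpty then 0 else 1), st.2 ++ [line]))
      (t, acc)
    = (t + ((ys.map (fun l => PySem.Str.len (pvF placeholder metadata_prefixes l))).sum + ys.length),
        acc ++ ys.map (pvF placeholder metadata_prefixes)) := by
  induction ys with
  | nil => intro t acc _; simp
  | cons y ys ih =>
    intro t acc hacc
    have he : acc.isEmpty = false := by simpa using hacc
    simp only [List.foldl_cons, List.map_cons, he, Bool.false_eq_true, if_false]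
    rw [ih _ (acc ++ [pvF placeholder metadata_prefixes y]) (by simp)]
    rw [Prod.mk.injEq]
    refine ⟨?_, by simp⟩
    simp only [List.sum_cons, List.length_cons]
    push_cast
    ring

-- joined length of a nonempty list as a sum
theorem pv_joinlen (zs : List String) (h : zs ≠ []) :
    PySem.Str.len (PySem.Str.join "\n" zs) = (zs.map PySem.Str.len).sum + zs.length - 1 := by
  induction zs with
  | nil => exact absurd rfl h
  | cons z zs ih =>
    cases zs with
    | nil => simp [PySem.Str.len_eq, PySem.Str.toList_join, PySem.Chars.join_singleton]
    | cons w ws =>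
      rw [pv_len_join_cons _ _ _ (by simp), ih (by simp)]
      have : PySem.Str.len "\n" = 1 := by decide
      rw [this]
      simp [List.map_cons]
      ring

-- ===== VERDICT (by name: the statement is the Claim_ definition above) =====
theorem remove_metadata_lines_spec : Claim_equal_remove_metadata_lines := by
  intro lines placeholder metadata_prefixes _
  unfold Spec_remove_metadata_lines
  have hA : remove_metadata_lines lines placeholder metadata_prefixes
      = (PySem.Str.len (PySem.Str.join "\n" (lines.map (pvF placeholder metadata_prefixes))),
         lines.map (pvF placeholder metadata_prefixes)) := by
    unfold remove_metadata_lines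
    have h := pv_loop_invariant placeholder metadata_prefixes lines []
    simp only [List.nil_append, List.length_nil, Nat.cast_zero, zero_add] at h
    exact h
  have hB : remove_metadata_lines_alt lines placeholder metadata_prefixes
      = (let st := lines.reverse.foldl
            (fun (st : Int × List String) (line : String) =>
              let line := pvF placeholder metadata_prefixes line
              (st.1 + PySem.Str.len line + (if st.2.isEmpty then 0 else 1), st.2 ++ [line]))
            ((0 : Int), ([] : List String));
         (st.1, st.2.reverse)) := by
    unfold remove_metadata_lines_alt
    simp only [pv_test_eq metadata_prefixes, pvF]
  rw [hA, hB]
  rcases h : lines.reverse with _ | ⟨y, ys⟩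
  · have hl : lines = [] := by simpa using congrArg List.reverse h
    subst hl
    simp [PySem.Str.len_eq, PySem.Str.toList_join, PySem.Chars.join_nil]
  · have hl : lines = ys.reverse ++ [y] := by
      rw [← List.reverse_reverse lines, h]; simp
    subst hl
    simp only [List.foldl_cons, List.isEmpty_nil, if_true, List.nil_append]
    rw [pv_B_fold_ne_nil placeholder metadata_prefixes ys _ [pvF placeholder metadata_prefixes y] (by simp)]
    rw [Prod.mk.injEq]
    constructor
    · rw [pv_joinlen _ (by simp)]
      simp only [List.map_append, List.map_reverse, List.sum_append, List.sum_reverse,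
        List.length_append, List.length_reverse, List.map_cons, List.map_nil,
        List.sum_cons, List.sum_nil, List.length_cons, List.length_nil,
        List.map_map, List.length_map, Function.comp_def]
      push_cast
      ring
    · simp [List.map_append, List.map_reverse]
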